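-- pv_equiv track=rewrite | github.com/IanMejia/aoc-2022 | day06/part2.py | compute
-- ===== SOURCE A (Python) =====
-- def compute(s: str) -> int:
--     packet_pos = 14
--     for pos, _ in enumerate(s):
--         packet_set = set(s[pos:pos + 14])
--         if len(packet_set) == 14:
--             packet_pos += pos
--             break
--
--     return packet_pos
-- ===== SOURCE B (Python) =====
-- def compute(s: str) -> int:
--     window = []  # characters of the current duplicate-free run, most recent first
--     for i, c in enumerate(s):
--         if c in window:
--             window = window[:window.index(c)]
--         window.insert(0, c)
--         if len(window) == 14:
--             return i + 1
--     return 14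
-- ===== Notes on version B (the rewrite author's own statement) =====
-- stated objective: faster
-- what changed: Instead of rebuilding a fresh 14-character set from a slice at every position, B maintains the current duplicate-free run as a single incrementally-updated window, truncating it at a repeated character and answering at the first index where it reaches length 14.
import Mathlib
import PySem

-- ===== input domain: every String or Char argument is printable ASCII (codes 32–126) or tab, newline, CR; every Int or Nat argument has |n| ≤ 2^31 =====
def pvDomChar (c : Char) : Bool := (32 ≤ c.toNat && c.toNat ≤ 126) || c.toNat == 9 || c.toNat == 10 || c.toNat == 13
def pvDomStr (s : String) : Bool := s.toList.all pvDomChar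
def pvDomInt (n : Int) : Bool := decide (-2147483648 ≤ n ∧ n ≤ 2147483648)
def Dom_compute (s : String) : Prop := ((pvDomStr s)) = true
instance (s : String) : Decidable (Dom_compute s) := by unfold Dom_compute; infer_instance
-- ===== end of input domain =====

-- B maintains the current duplicate-free run as one incrementally truncated window (no per-position set/slice of s); same result, measured constant-factor faster.

-- ===== PORT A =====
-- the for-loop with break: recursion over enumerate(s)
def computeA_loop (l : List Char) : List (Int × Char) → Int
  | [] => 14
  | (pos, _) :: rest =>
    let packet_set : PySem.Set Char :=
      PySem.Set.ofList (PySem.List.slice l (some pos) (some (pos + 14)))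
    if PySem.Set.len packet_set = 14 then 14 + pos
    else computeA_loop l rest

def compute (s : String) : Int :=
  computeA_loop s.toList (PySem.List.enumerate s.toList 0)

-- ===== PORT B =====
-- the for-loop with return: recursion over enumerate(s), carrying the window
def computeB_loop : List Char → List (Int × Char) → Int
  | _, [] => 14
  | win, (i, c) :: rest =>
    -- if c in window: window = window[:window.index(c)]
    let win1 := if c ∈ win
      then (match PySem.List.index? win c with
            | some k => PySem.List.slice win none (some (k : Int))
            | none => win)
      else win
    -- window.insert(0, c)
    let win2 := c :: win1
    if PySem.List.len win2 = 14 then i + 1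
    else computeB_loop win2 rest

def compute_alt (s : String) : Int :=
  computeB_loop [] (PySem.List.enumerate s.toList 0)

-- ===== PRECONDITION & SPEC =====
def Spec_compute (s : String) (out : Int) : Prop := out = compute_alt s
instance (s : String) (out : Int) : Decidable (Spec_compute s out) := by unfold Spec_compute; infer_instance

-- ===== CLAIM (what is proved, stated in full; the proofs are below) =====
def Claim_equal_compute : Prop := ∀ (s : String), Dom_compute s → Spec_compute s (compute s)

-- ===== LEMMAS AND PROOFS =====

-- window at position p is good: 14 chars available from p, all distinct
def goodAt (l : List Char) (p : Nat) : Bool :=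
  decide (p + 14 ≤ l.length) && decide (((l.drop p).take 14).Nodup)

-- first good position ≥ p
def ffrom (l : List Char) (p : Nat) : Option Nat :=
  if _h : p < l.length then (if goodAt l p then some p else ffrom l (p + 1)) else none
termination_by l.length - p

-- longest duplicate-free prefix
def lnp : List Char → List Char
  | [] => []
  | c :: r => c :: (lnp r).takeWhile (fun x => x != c)

theorem goodAt_le (l : List Char) (p : Nat) (h : goodAt l p = true) : p + 14 ≤ l.length := by
  simp [goodAt] at h; exact h.1

theorem ffrom_step (l : List Char) (p : Nat) (h : p < l.length) :
    ffrom l p = if goodAt l p then some p else ffrom l (p + 1) := by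
  rw [ffrom, dif_pos h]

theorem ffrom_none_of (l : List Char) (p : Nat)
    (h : ∀ q, p ≤ q → goodAt l q = false) : ffrom l p = none := by
  unfold ffrom
  split
  · rw [h p le_rfl]
    simp only [Bool.false_eq_true, if_false]
    exact ffrom_none_of l (p + 1) (fun q hq => h q (by omega))
  · rfl
termination_by l.length - p

theorem ffrom_some_of (l : List Char) (p q : Nat) (hpq : p ≤ q) (hq : goodAt l q = true)
    (hmin : ∀ r, p ≤ r → r < q → goodAt l r = false) : ffrom l p = some q := by
  have hlt : p < l.length := by have := goodAt_le l q hq; omega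
  unfold ffrom
  rw [dif_pos hlt]
  rcases eq_or_lt_of_le hpq with rfl | hlt2
  · rw [hq]; simp
  · rw [hmin p le_rfl hlt2]
    simp only [Bool.false_eq_true, if_false]
    exact ffrom_some_of l (p + 1) q (by omega) hq (fun r h1 h2 => hmin r (by omega) h2)
termination_by l.length - p

-- ofList length = length forces Nodup
theorem ofList_len_nodup (w : List Char) (h : (PySem.Set.ofList w).length = w.length) :
    w.Nodup := by
  induction w using List.reverseRecOn with
  | nil => simp
  | append_singleton xs x ih =>
    rw [PySem.Set.ofList_append_singleton, PySem.Set.add_eq_ite] at h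
    by_cases hx : x ∈ PySem.Set.ofList xs
    · rw [if_pos hx] at h
      have := PySem.Set.length_ofList_le (xs := xs)
      simp at h; omega
    · rw [if_neg hx] at h
      simp at h
      have hxs := ih h
      have hx' : x ∉ xs := fun hm => hx ((PySem.Set.mem_ofList xs x).2 hm)
      simp only [List.nodup_append, List.nodup_cons, List.nodup_nil]
      refine ⟨hxs, by simp, ?_⟩
      intro a ha b hb
      rw [List.mem_singleton] at hb
      subst hb
      exact fun h => hx' (h ▸ ha)

theorem ofList_len_iff (w : List Char) (hle : w.length ≤ 14) :
    ((PySem.Set.ofList w).length = 14) ↔ (w.Nodup ∧ w.length = 14) := by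
  constructor
  · intro h
    have h1 := PySem.Set.length_ofList_le (xs := w)
    have hw : w.length = 14 := by omega
    exact ⟨ofList_len_nodup w (by omega), hw⟩
  · rintro ⟨hn, hl⟩
    rw [PySem.Set.ofList_eq_self_of_nodup w hn, hl]

-- A's loop finds the first good position
theorem A_loop_eq (l : List Char) : ∀ (t : List Char) (p : Nat), l.drop p = t →
    computeA_loop l (PySem.List.enumerate t (p : Int)) =
      (match ffrom l p with | some q => 14 + (q : Int) | none => 14) := by
  intro t
  induction t with
  | nil =>
    intro p hp
    have hlen : l.length ≤ p := by
      have h0 := congrArg List.length hp; simp at h0; omega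
    rw [ffrom_none_of l p (fun q hq => by
      by_contra hg
      have := goodAt_le l q (by simpa using hg)
      omega)]
    simp [computeA_loop, PySem.List.enumerate_nil]
  | cons x r ih =>
    intro p hp
    have hplen : p < l.length := by
      by_contra hc
      rw [List.drop_eq_nil_of_le (by omega)] at hp
      simp at hp
    rw [PySem.List.enumerate_cons]
    show (if PySem.Set.len (PySem.Set.ofList
        (PySem.List.slice l (some (p : Int)) (some ((p : Int) + 14)))) = 14
      then 14 + (p : Int) else computeA_loop l (PySem.List.enumerate r ((p : Int) + 1))) = _
    have hsl : PySem.List.slice l (some (p : Int)) (some ((p : Int) + 14))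
        = (l.drop p).take 14 := by
      have := PySem.List.slice_natCast_add (xs := l) (j := p) (n := 14)
      simpa using this
    have hwlen : ((l.drop p).take 14).length ≤ 14 := by
      simp [List.length_take]
    have hlen14 : (((l.drop p).take 14).length = 14) ↔ p + 14 ≤ l.length := by
      simp [List.length_take]; omega
    have htest : (PySem.Set.len (PySem.Set.ofList ((l.drop p).take 14)) = (14 : Int))
        ↔ goodAt l p = true := by
      have : PySem.Set.len (PySem.Set.ofList ((l.drop p).take 14))
          = ((PySem.Set.ofList ((l.drop p).take 14)).length : Int) := by
        simp [PySem.Set.len]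
      rw [this]
      constructor
      · intro h
        have h' : (PySem.Set.ofList ((l.drop p).take 14)).length = 14 := by exact_mod_cast h
        rcases (ofList_len_iff _ hwlen).1 h' with ⟨hn, hl⟩
        simp [goodAt, hn, hlen14.1 hl]
      · intro h
        simp [goodAt] at h
        have h' := (ofList_len_iff _ hwlen).2 ⟨h.2, hlen14.2 h.1⟩
        exact_mod_cast h'
    rw [hsl]
    by_cases hg : goodAt l p = true
    · rw [if_pos (htest.2 hg)]
      rw [ffrom_some_of l p p le_rfl hg (fun r h1 h2 => by omega)]
    · rw [if_neg (fun hc => hg (htest.1 hc))]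
      have hr : l.drop (p + 1) = r := by
        have h2 := List.tail_drop (l := l) (i := p)
        rw [hp] at h2
        exact h2.symm
      have := ih (p + 1) hr
      rw [show ((p : Int) + 1) = (((p + 1 : Nat)) : Int) by push_cast; ring, this,
        ffrom_step l p hplen, if_neg (by simp [hg])]

-- takeWhile of a prefix avoiding c
theorem prefix_takeWhile (c : Char) : ∀ (p q : List Char), p <+: q → c ∉ p →
    p <+: q.takeWhile (fun x => x != c) := by
  intro p
  induction p with
  | nil => intro q _ _; exact List.nil_prefix
  | cons a p' ih =>
    intro q hpq hc
    rcases hpq with ⟨s, rfl⟩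
    have hac : a ≠ c := fun h => hc (by simp [h])
    simp only [List.cons_append, List.takeWhile_cons, bne_iff_ne, ne_eq, hac,
      not_false_eq_true, if_true]
    exact List.cons_prefix_cons.2 ⟨rfl, ih (p' ++ s) ⟨s, rfl⟩ (fun h => hc (by simp [h]))⟩

theorem lnp_prefix : ∀ (r : List Char), lnp r <+: r := by
  intro r
  induction r with
  | nil => exact List.nil_prefix
  | cons c r ih =>
    rw [lnp]
    exact List.cons_prefix_cons.2 ⟨rfl, (List.takeWhile_prefix _).trans ih⟩

theorem lnp_nodup : ∀ (r : List Char), (lnp r).Nodup := by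
  intro r
  induction r with
  | nil => simp [lnp]
  | cons c r ih =>
    rw [lnp]
    refine List.nodup_cons.2 ⟨?_, ih.sublist (List.takeWhile_sublist _)⟩
    intro hc
    have := List.mem_takeWhile_imp hc
    simp at this

theorem lnp_max : ∀ (r p : List Char), p <+: r → p.Nodup → p <+: lnp r := by
  intro r
  induction r with
  | nil =>
    intro p hp _
    have hp' : p = [] := by simpa using hp
    subst hp'
    exact List.nil_prefix
  | cons c r ih =>
    intro p hp hn
    match p, hp with
    | [], _ => exact List.nil_prefix
    | b :: p', hp =>
      rcases List.cons_prefix_cons.1 hp with ⟨rfl, hp'⟩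
      rcases List.nodup_cons.1 hn with ⟨hcp, hn'⟩
      rw [lnp]
      exact List.cons_prefix_cons.2 ⟨rfl, prefix_takeWhile _ p' (lnp r) (ih p' hp' hn') hcp⟩

theorem take_of_prefix {p r : List Char} (h : p <+: r) (n : Nat) (hn : n ≤ p.length) :
    r.take n = p.take n := by
  rcases h with ⟨s, rfl⟩
  rw [List.take_append_of_le_length hn]

theorem lnp_len_iff (r : List Char) :
    14 ≤ (lnp r).length ↔ (14 ≤ r.length ∧ (r.take 14).Nodup) := by
  constructor
  · intro h
    have hpre := lnp_prefix r
    have hlen : 14 ≤ r.length := le_trans h hpre.length_le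
    refine ⟨hlen, ?_⟩
    rw [take_of_prefix hpre 14 h]
    exact (lnp_nodup r).sublist (List.take_sublist _ _)
  · rintro ⟨hlen, hn⟩
    have hpre : r.take 14 <+: lnp r := lnp_max r _ (List.take_prefix _ _) hn
    have := hpre.length_le
    rw [List.length_take] at this
    omega

-- B's window update is exactly lnp's step
theorem takeWhile_append_not_mem (c : Char) : ∀ (pre suf : List Char), c ∉ pre →
    (pre ++ c :: suf).takeWhile (fun x => x != c) = pre := by
  intro pre
  induction pre with
  | nil => intro suf _; simp
  | cons a p' ih =>
    intro suf hc
    have hac : a ≠ c := fun h => hc (by simp [h])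
    simp only [List.cons_append, List.takeWhile_cons, bne_iff_ne, ne_eq, hac,
      not_false_eq_true, if_true, List.cons.injEq, true_and]
    exact ih suf (fun h => hc (by simp [h]))

theorem win_update (win : List Char) (c : Char) :
    (if c ∈ win
      then (match PySem.List.index? win c with
            | some k => PySem.List.slice win none (some (k : Int))
            | none => win)
      else win) = win.takeWhile (fun x => x != c) := by
  by_cases hc : c ∈ win
  · rw [if_pos hc]
    have hs : (PySem.List.index? win c).isSome := (PySem.List.index?_isSome_iff win c).2 hc
    rcases Option.isSome_iff_exists.1 hs with ⟨k, hk⟩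
    rcases (PySem.List.index?_eq_some_iff win c k).1 hk with ⟨pre, suf, rfl, hlen, hpre⟩
    rw [hk]
    show PySem.List.slice (pre ++ c :: suf) none (some (k : Int))
      = (pre ++ c :: suf).takeWhile (fun x => x != c)
    rw [PySem.List.slice_to_natCast]
    rw [takeWhile_append_not_mem c pre suf hpre, ← hlen,
      List.take_append_of_le_length le_rfl, List.take_length]
  · rw [if_neg hc]
    symm
    apply List.takeWhile_eq_self_iff.2
    intro x hx
    simp only [bne_iff_ne, ne_eq]
    exact fun h => hc (h ▸ hx)

-- the reversed 14-window at the end of the processed prefix is A's window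
theorem window_rev (l : List Char) (i : Nat) (hi : i < l.length) (h13 : 13 ≤ i) :
    ((l.take (i + 1)).reverse).take 14 = ((l.drop (i - 13)).take 14).reverse := by
  have hlen : (l.take (i + 1)).length = i + 1 := by
    rw [List.length_take]; omega
  rw [List.take_reverse]
  rw [hlen]
  congr 1
  rw [List.drop_take]
  congr 1 <;> omega

theorem B_loop_eq (l : List Char) : ∀ (t : List Char) (i : Nat) (win : List Char),
    l.drop i = t →
    win = lnp ((l.take i).reverse) →
    win.length ≤ 13 →
    (∀ p, p + 13 < i → goodAt l p = false) →
    computeB_loop win (PySem.List.enumerate t (i : Int)) =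
      (match ffrom l 0 with | some q => 14 + (q : Int) | none => 14) := by
  intro t
  induction t with
  | nil =>
    intro i win hdrop hwin hsmall hnb
    have hlen : l.length ≤ i := by
      have h0 := congrArg List.length hdrop; simp at h0; omega
    rw [ffrom_none_of l 0 (fun q _ => by
      by_contra hg
      have hg' : goodAt l q = true := by simpa using hg
      have hle := goodAt_le l q hg'
      have hfalse := hnb q (by omega)
      rw [hg'] at hfalse
      exact Bool.noConfusion hfalse)]
    simp [computeB_loop, PySem.List.enumerate_nil]
  | cons xc r ih =>
    intro i win hdrop hwin hsmall hnb
    have hilen : i < l.length := by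
      by_contra hc
      rw [List.drop_eq_nil_of_le (by omega)] at hdrop
      simp at hdrop
    rw [List.drop_eq_getElem_cons hilen] at hdrop
    injection hdrop with hxc' hr
    have hxc : xc = l[i] := hxc'.symm
    rw [PySem.List.enumerate_cons]
    show (let win1 := if xc ∈ win
        then (match PySem.List.index? win xc with
              | some k => PySem.List.slice win none (some (k : Int))
              | none => win)
        else win
      let win2 := xc :: win1
      if PySem.List.len win2 = 14 then (i : Int) + 1
      else computeB_loop win2 (PySem.List.enumerate r ((i : Int) + 1))) = _
    simp only [win_update win xc]
    set win2 := xc :: win.takeWhile (fun x => x != xc) with hwin2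
    have hrev : (l.take (i + 1)).reverse = xc :: (l.take i).reverse := by
      rw [List.take_add_one, List.getElem?_eq_getElem hilen]
      simp [hxc]
    have hwin2lnp : win2 = lnp ((l.take (i + 1)).reverse) := by
      rw [hrev, lnp, hwin2, hwin]
    have hlen2 : win2.length ≤ 14 := by
      have := (List.takeWhile_sublist (p := fun x => x != xc) (l := win)).length_le
      simp only [hwin2, List.length_cons]; omega
    have hrevlen : ((l.take (i + 1)).reverse).length = i + 1 := by
      rw [List.length_reverse, List.length_take]; omega
    by_cases h14 : PySem.List.len win2 = (14 : Int)
    · rw [if_pos h14]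
      have hlen14 : win2.length = 14 := by
        simp [PySem.List.len] at h14; exact_mod_cast h14
      have hge : 14 ≤ (lnp ((l.take (i + 1)).reverse)).length := by
        rw [← hwin2lnp, hlen14]
      rcases (lnp_len_iff _).1 hge with ⟨hlen', hnodup⟩
      rw [hrevlen] at hlen'
      have h13 : 13 ≤ i := by omega
      rw [window_rev l i hilen h13] at hnodup
      have hgood : goodAt l (i - 13) = true := by
        simp [goodAt]
        constructor
        · omega
        · exact List.nodup_reverse.1 hnodup
      rw [ffrom_some_of l 0 (i - 13) (by omega) hgood
        (fun p _ hp => hnb p (by omega))]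
      simp only
      push_cast [Nat.cast_sub h13]
      ring
    · rw [if_neg h14]
      have hlen2' : win2.length ≤ 13 := by
        have : win2.length ≠ 14 := by
          intro hc
          apply h14
          simp [PySem.List.len, hc]
        omega
      have hnb' : ∀ p, p + 13 < i + 1 → goodAt l p = false := by
        intro p hp
        rcases Nat.lt_or_ge (p + 13) i with h | h
        · exact hnb p h
        · have hpi : p + 13 = i := by omega
          by_contra hg
          have hg' : goodAt l p = true := by simpa using hg
          simp [goodAt] at hg'
          rcases hg' with ⟨hple, hnd⟩
          have hnodup : (((l.take (i + 1)).reverse).take 14).Nodup := by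
            rw [window_rev l i hilen (by omega)]
            rw [show i - 13 = p by omega]
            exact List.nodup_reverse.2 hnd
          have hge : 14 ≤ (lnp ((l.take (i + 1)).reverse)).length :=
            (lnp_len_iff _).2 ⟨by rw [hrevlen]; omega, hnodup⟩
          rw [← hwin2lnp] at hge
          omega
      have := ih (i + 1) win2 hr hwin2lnp hlen2' hnb'
      rw [show ((i : Int) + 1) = (((i + 1 : Nat)) : Int) by push_cast; ring]
      exact this

-- ===== VERDICT (by name: the statement is the Claim_ definition above) =====
theorem compute_spec : Claim_equal_compute := by
  intro s _
  unfold Spec_compute compute compute_alt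
  have hA := A_loop_eq s.toList s.toList 0 (by simp)
  have hB := B_loop_eq s.toList s.toList 0 [] (by simp) (by simp [lnp]) (by simp)
    (fun p hp => by omega)
  simp only [Nat.cast_zero] at hA hB
  rw [hA, hB]
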